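-- pv_equiv track=rewrite | github.com/diligencefrozen/Discord_AI_bot | main.py | fix_code
-- ===== SOURCE A (Python) =====
-- from typing import Optional, List
-- from typing import Optional, List, Union, Dict
--
-- def fix_code(chunks: List[str]) -> List[str]:
--     fixed, open_block = [], False
--     for ch in chunks:
--         if ch.count("```") % 2:
--             ch = ("```\n" + ch) if open_block else (ch + "\n```")
--             open_block = not open_block
--         fixed.append(ch)
--     return fixed
-- ===== SOURCE B (Python) =====
-- def fix_code(chunks):
--     odd = [ch.count("```") % 2 == 1 for ch in chunks]
--     pref, run = [], 0
--     for o in odd: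
--         pref.append(run)
--         run += o
--     return [(("```\n" + ch) if p % 2 == 1 else (ch + "\n```")) if o else ch
--             for ch, o, p in zip(chunks, odd, pref)]
-- ===== Notes on version B (the rewrite author's own statement) =====
-- stated objective: alternative
-- what changed: replaces the single mutable-toggle loop with three separate passes: a per-chunk odd-fence parity list, a cumulative count of odd chunks strictly before each index, and a zip-comprehension that tags each odd chunk by the parity of that prefix count
import Mathlib
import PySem

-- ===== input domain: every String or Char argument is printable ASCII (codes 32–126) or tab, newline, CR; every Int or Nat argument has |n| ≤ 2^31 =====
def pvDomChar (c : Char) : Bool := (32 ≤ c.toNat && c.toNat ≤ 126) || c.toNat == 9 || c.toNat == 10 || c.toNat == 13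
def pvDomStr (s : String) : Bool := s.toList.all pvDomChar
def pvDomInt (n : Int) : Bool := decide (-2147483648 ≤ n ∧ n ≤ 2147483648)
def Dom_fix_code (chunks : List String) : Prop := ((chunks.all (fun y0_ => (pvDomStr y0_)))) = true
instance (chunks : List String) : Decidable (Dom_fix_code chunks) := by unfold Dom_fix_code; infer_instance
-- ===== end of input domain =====

-- B replaces A's single mutable-toggle loop by three passes (per-chunk fence parity,
-- prefix-parity state list, zip assembly); objective: alternative decomposition, same values.

-- ===== PORT A =====
def fix_code (chunks : List String) : List String :=
  (chunks.foldl
    (fun (st : List String × Bool) ch =>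
      if PySem.Str.count ch "```" % 2 ≠ 0 then
        (st.1 ++ [if st.2 then "```\n" ++ ch else ch ++ "\n```"], !st.2)
      else
        (st.1 ++ [ch], st.2))
    ([], false)).1

-- ===== PORT B =====
def fix_code_alt (chunks : List String) : List String :=
  let odd := chunks.map (fun ch => PySem.Str.count ch "```" % 2 == 1)
  let pref := (odd.foldl
    (fun (st : List Nat × Nat) o => (st.1 ++ [st.2], st.2 + if o then 1 else 0))
    ([], 0)).1
  (chunks.zip (odd.zip pref)).map
    (fun p => if p.2.1 then (if p.2.2 % 2 == 1 then "```\n" ++ p.1 else p.1 ++ "\n```") else p.1)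

-- ===== PRECONDITION & SPEC =====
def Spec_fix_code (chunks : List String) (out : List String) : Prop := out = fix_code_alt chunks
instance (chunks : List String) (out : List String) : Decidable (Spec_fix_code chunks out) := by unfold Spec_fix_code; infer_instance

-- ===== CLAIM (what is proved, stated in full; the proofs are below) =====
def Claim_equal_fix_code : Prop := ∀ (chunks : List String), Dom_fix_code chunks → Spec_fix_code chunks (fix_code chunks)

-- ===== LEMMAS AND PROOFS =====

def pvOdd (ch : String) : Bool := PySem.Str.count ch "```" % 2 == 1

def pvTag (b : Bool) (ch : String) : String := if b then "```\n" ++ ch else ch ++ "\n```"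

def pvGo : Bool → List String → List String
  | _, [] => []
  | b, c :: cs => if pvOdd c then pvTag b c :: pvGo (!b) cs else c :: pvGo b cs

theorem pvFoldA (chunks : List String) (acc : List String) (b : Bool) :
    (chunks.foldl
      (fun (st : List String × Bool) ch =>
        if PySem.Str.count ch "```" % 2 ≠ 0 then
          (st.1 ++ [if st.2 then "```\n" ++ ch else ch ++ "\n```"], !st.2)
        else
          (st.1 ++ [ch], st.2))
      (acc, b)).1 = acc ++ pvGo b chunks := by
  induction chunks generalizing acc b with
  | nil => simp [pvGo]
  | cons c cs ih =>
    rw [List.foldl_cons]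
    by_cases h : PySem.Str.count c "```" % 2 ≠ 0
    · have hodd : pvOdd c = true := by
        simp only [pvOdd, beq_iff_eq]; omega
      rw [if_pos h, ih]
      simp [pvGo, hodd, pvTag]
    · have h0 : PySem.Str.count c "```" % 2 = 0 := not_not.mp h
      have hodd : pvOdd c = false := by
        simp only [pvOdd, beq_eq_false_iff_ne, ne_eq]; omega
      rw [if_neg h, ih]
      simp [pvGo, hodd]

theorem pvPref (l : List Bool) (acc : List Nat) (run : Nat) :
    (l.foldl
      (fun (st : List Nat × Nat) o => (st.1 ++ [st.2], st.2 + if o then 1 else 0))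
      (acc, run)).1
    = acc ++ (List.range l.length).map (fun i => run + (l.take i).count true) := by
  induction l generalizing acc run with
  | nil => simp
  | cons o l ih =>
    rw [List.foldl_cons, ih]
    have hst : ((fun i => run + List.count true (List.take i (o :: l))) ∘ Nat.succ)
        = (fun i => (run + if o = true then 1 else 0) + List.count true (List.take i l)) := by
      funext i
      simp only [Function.comp, List.take_succ_cons, List.count_cons]
      by_cases h : o = true <;> simp [h] <;> omega
    simp only [List.length_cons, List.range_succ_eq_map, List.map_cons, List.map_map,
      List.take_zero, List.count_nil, Nat.add_zero, hst, List.append_assoc,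
      List.singleton_append]

theorem pvBuildB (chunks : List String) (k : Nat) :
    (chunks.zip ((chunks.map pvOdd).zip
        ((List.range chunks.length).map
          (fun i => k + ((chunks.map pvOdd).take i).count true)))).map
      (fun p => if p.2.1 then (if p.2.2 % 2 == 1 then "```\n" ++ p.1 else p.1 ++ "\n```") else p.1)
    = pvGo (k % 2 == 1) chunks := by
  induction chunks generalizing k with
  | nil => simp [pvGo]
  | cons c cs ih =>
    simp only [List.map_cons, List.length_cons, List.range_succ_eq_map, List.map_map,
      List.zip_cons_cons, List.take_zero]
    have hst : ((fun i => k + ((pvOdd c :: List.map pvOdd cs).take i).count true) ∘ Nat.succ)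
        = (fun i => (k + if pvOdd c = true then 1 else 0) + ((List.map pvOdd cs).take i).count true) := by
      funext i
      simp only [Function.comp, List.take_succ_cons, List.count_cons]
      by_cases h : pvOdd c = true <;> simp [h] <;> omega
    rw [hst, ih (k + if pvOdd c = true then 1 else 0)]
    by_cases h : pvOdd c = true
    · have hk : (((k + 1) % 2 == 1) : Bool) = !(k % 2 == 1) := by
        rcases Nat.mod_two_eq_zero_or_one k with h0 | h0 <;>
          simp [Nat.add_mod, h0]
      simp [pvGo, h, hk, pvTag]
    · simp [pvGo, h]

-- ===== VERDICT (by name: the statement is the Claim_ definition above) =====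
theorem fix_code_spec : Claim_equal_fix_code := by
  intro chunks _
  show fix_code chunks = fix_code_alt chunks
  have hA : fix_code chunks = pvGo false chunks := by
    unfold fix_code
    simpa using pvFoldA chunks [] false
  have hB : fix_code_alt chunks = pvGo false chunks := by
    unfold fix_code_alt
    have hfun : (fun ch => PySem.Str.count ch "```" % 2 == 1) = pvOdd := rfl
    rw [hfun]
    dsimp only
    have hp := pvPref (chunks.map pvOdd) [] 0
    simp only [List.nil_append, List.length_map, Nat.zero_add] at hp
    rw [hp]
    have := pvBuildB chunks 0
    simp only [Nat.zero_add] at this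
    simpa using this
  rw [hA, hB]
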